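-- pv_equiv track=rewrite | github.com/snopf/snopf | src/host/pc/password_generator.py | check_rules_valid
-- ===== SOURCE A (Python) =====
-- PW_RULE_INCLUDE_LOWERCASE = 1 << 0
--
-- PW_RULE_INCLUDE_UPPERCASE = 1 << 1
--
-- PW_RULE_INCLUDE_DIGIT = 1 << 2
--
-- PW_RULE_INCLUDE_SPECIAL = 1 << 3
--
-- PW_GROUP_BOUND_LOWERCASE = 18
--
-- PW_GROUP_BOUND_UPPERCASE = 36
--
-- PW_GROUP_BOUND_DIGIT = 46
--
-- def check_rules_valid(rules, keymap):
--     '''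
--     For the rules to be valid you must include at minimum 10 characters from
--     every group that shall be included by the rules.
--
--     Parameters
--     ----------
--     rules : int
--         Flags for group inclusion
--     keymap : iterable
--         Indices for the base64 transformation
--
--     Returns
--     -------
--     True if the rules are valid, else False
--     '''
--     num_keys = {PW_RULE_INCLUDE_LOWERCASE: 0, PW_RULE_INCLUDE_UPPERCASE: 0,
--                 PW_RULE_INCLUDE_DIGIT: 0, PW_RULE_INCLUDE_SPECIAL: 0}
--     for key in keymap:
--         if key < PW_GROUP_BOUND_LOWERCASE:
--             num_keys[PW_RULE_INCLUDE_LOWERCASE] += 1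
--         elif key < PW_GROUP_BOUND_UPPERCASE:
--             num_keys[PW_RULE_INCLUDE_UPPERCASE] += 1
--         elif key < PW_GROUP_BOUND_DIGIT:
--             num_keys[PW_RULE_INCLUDE_DIGIT] += 1
--         else:
--             num_keys[PW_RULE_INCLUDE_SPECIAL] += 1
--
--     for rule in num_keys.keys():
--         if rules & rule and num_keys[rule] < 10:
--             return False
--
--     return True
-- ===== SOURCE B (Python) =====
-- # Per-group counting with early exit: for each rule flag set in `rules`,
-- # count keys in that group's range and fail fast if below 10.
-- def check_rules_valid(rules, keymap):
--     keys = list(keymap)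
--     groups = [(1 << 0, None, 18), (1 << 1, 18, 36), (1 << 2, 36, 46), (1 << 3, 46, None)]
--     for flag, lo, hi in groups:
--         if rules & flag:
--             count = 0
--             for k in keys:
--                 if (lo is None or k >= lo) and (hi is None or k < hi):
--                     count += 1
--             if count < 10:
--                 return False
--     return True
-- ===== Notes on version B (the rewrite author's own statement) =====
-- stated objective: alternative
-- what changed: Replaced the single pass that fills a four-entry dict (then a dict-key check loop) with a per-required-group counting pass over the materialized key list with early exit; groups whose flag is not set are never counted.
import Mathlib
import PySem

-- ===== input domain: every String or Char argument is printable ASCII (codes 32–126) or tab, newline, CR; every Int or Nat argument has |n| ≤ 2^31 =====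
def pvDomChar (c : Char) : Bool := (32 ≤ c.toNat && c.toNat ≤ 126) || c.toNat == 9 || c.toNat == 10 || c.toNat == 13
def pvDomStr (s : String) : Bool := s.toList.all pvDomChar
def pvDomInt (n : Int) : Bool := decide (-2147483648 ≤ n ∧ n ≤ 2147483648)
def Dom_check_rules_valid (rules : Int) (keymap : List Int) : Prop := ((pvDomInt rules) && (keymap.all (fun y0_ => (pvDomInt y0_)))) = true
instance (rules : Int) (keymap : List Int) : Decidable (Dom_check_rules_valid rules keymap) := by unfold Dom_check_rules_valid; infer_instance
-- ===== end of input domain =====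

-- B replaces A's single dict-filling pass + dict-key check loop with a per-required-group
-- counting pass over the key list with early exit (objective: alternative; not claimed faster).


-- ===== PORT A =====
-- second loop of A: 'for rule in num_keys.keys(): if rules & rule and num_keys[rule] < 10: return False'
def checkLoopA (rules : Int) (d : PySem.Dict Int Int) : List Int → Bool
  | [] => true
  | r :: rest =>
    if PySem.Int.band rules r ≠ 0 ∧ d.getD r 0 < 10 then false
    else checkLoopA rules d rest

def check_rules_valid (rules : Int) (keymap : List Int) : Bool :=
  let num_keys : PySem.Dict Int Int := PySem.Dict.ofList [(1, 0), (2, 0), (4, 0), (8, 0)]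
  let num_keys := keymap.foldl (fun d key =>
    if key < 18 then d.modify 1 0 (· + 1)
    else if key < 36 then d.modify 2 0 (· + 1)
    else if key < 46 then d.modify 4 0 (· + 1)
    else d.modify 8 0 (· + 1)) num_keys
  checkLoopA rules num_keys num_keys.keys

-- ===== PORT B =====
-- 'count = 0; for k in keys: if in-range: count += 1'
def countGroup (keys : List Int) (lo hi : Option Int) : Int :=
  keys.foldl (fun count k =>
    if (lo.isNone || decide (k ≥ lo.getD 0)) && (hi.isNone || decide (k < hi.getD 0)) then count + 1
    else count) 0

def checkLoopB (rules : Int) (keys : List Int) : List (Int × Option Int × Option Int) → Bool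
  | [] => true
  | (flag, lo, hi) :: rest =>
    if PySem.Int.band rules flag ≠ 0 then
      if countGroup keys lo hi < 10 then false else checkLoopB rules keys rest
    else checkLoopB rules keys rest

def check_rules_valid_alt (rules : Int) (keymap : List Int) : Bool :=
  checkLoopB rules keymap
    [(1, none, some 18), (2, some 18, some 36), (4, some 36, some 46), (8, some 46, none)]

-- ===== PRECONDITION & SPEC =====
def Spec_check_rules_valid (rules : Int) (keymap : List Int) (out : Bool) : Prop := out = check_rules_valid_alt rules keymap
instance (rules : Int) (keymap : List Int) (out : Bool) : Decidable (Spec_check_rules_valid rules keymap out) := by unfold Spec_check_rules_valid; infer_instance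

-- ===== CLAIM (what is proved, stated in full; the proofs are below) =====
def Claim_equal_check_rules_valid : Prop := ∀ (rules : Int) (keymap : List Int), Dom_check_rules_valid rules keymap → Spec_check_rules_valid rules keymap (check_rules_valid rules keymap)

-- ===== LEMMAS AND PROOFS =====

theorem countGroup_eq (l : List Int) (lo hi : Option Int) :
    countGroup l lo hi =
      (l.countP (fun k => (lo.isNone || decide (k ≥ lo.getD 0)) && (hi.isNone || decide (k < hi.getD 0))) : Int) := by
  unfold countGroup
  rw [PySem.List.foldl_if_add_one]
  simp

-- A's counting fold yields the four-entry dict holding exactly B's per-group counts.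
theorem foldA_eq (l : List Int) (c1 c2 c4 c8 : Int) :
    l.foldl (fun d key =>
      if key < 18 then d.modify 1 0 (· + 1)
      else if key < 36 then d.modify 2 0 (· + 1)
      else if key < 46 then d.modify 4 0 (· + 1)
      else d.modify 8 0 (· + 1)) (PySem.Dict.ofList [((1 : Int), c1), (2, c2), (4, c4), (8, c8)]) =
    PySem.Dict.ofList
      [((1 : Int), c1 + countGroup l none (some 18)),
       (2, c2 + countGroup l (some 18) (some 36)),
       (4, c4 + countGroup l (some 36) (some 46)),
       (8, c8 + countGroup l (some 46) none)] := by
  induction l generalizing c1 c2 c4 c8 with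
  | nil => simp [countGroup_eq]
  | cons k l ih =>
    simp only [List.foldl_cons]
    by_cases h1 : k < 18
    · rw [if_pos h1]
      refine (ih (c1 + 1) c2 c4 c8).trans ?_
      congr 1
      simp [countGroup_eq, List.countP_cons]
      split_ifs
      omega
    · rw [if_neg h1]
      by_cases h2 : k < 36
      · rw [if_pos h2]
        refine (ih c1 (c2 + 1) c4 c8).trans ?_
        congr 1
        simp [countGroup_eq, List.countP_cons]
        split_ifs <;> omega
      · rw [if_neg h2]
        by_cases h3 : k < 46
        · rw [if_pos h3]
          refine (ih c1 c2 (c4 + 1) c8).trans ?_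
          congr 1
          simp [countGroup_eq, List.countP_cons]
          split_ifs <;> omega
        · rw [if_neg h3]
          refine (ih c1 c2 c4 (c8 + 1)).trans ?_
          congr 1
          simp [countGroup_eq, List.countP_cons]
          split_ifs <;> omega

theorem if_and_split (p q : Prop) [Decidable p] [Decidable q] (x : Bool) :
    (if p ∧ q then false else x) = (if p then if q then false else x else x) := by
  by_cases hp : p <;> by_cases hq : q <;> simp [hp, hq]

-- ===== VERDICT (by name: the statement is the Claim_ definition above) =====
theorem check_rules_valid_spec : Claim_equal_check_rules_valid := by
  intro rules keymap _
  unfold Spec_check_rules_valid check_rules_valid check_rules_valid_alt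
  dsimp only
  rw [foldA_eq]
  have g1 : (PySem.Dict.ofList
      [((1 : Int), (0 : Int) + countGroup keymap none (some 18)),
       (2, 0 + countGroup keymap (some 18) (some 36)),
       (4, 0 + countGroup keymap (some 36) (some 46)),
       (8, 0 + countGroup keymap (some 46) none)]).keys = [1, 2, 4, 8] := rfl
  rw [g1]
  simp only [checkLoopA, checkLoopB,
    show ∀ a b c d : Int, (PySem.Dict.ofList [((1:Int), a), (2, b), (4, c), (8, d)]).getD 1 0 = a from fun _ _ _ _ => rfl,
    show ∀ a b c d : Int, (PySem.Dict.ofList [((1:Int), a), (2, b), (4, c), (8, d)]).getD 2 0 = b from fun _ _ _ _ => rfl,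
    show ∀ a b c d : Int, (PySem.Dict.ofList [((1:Int), a), (2, b), (4, c), (8, d)]).getD 4 0 = c from fun _ _ _ _ => rfl,
    show ∀ a b c d : Int, (PySem.Dict.ofList [((1:Int), a), (2, b), (4, c), (8, d)]).getD 8 0 = d from fun _ _ _ _ => rfl,
    zero_add]
  simp only [if_and_split]
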